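-- pv_equiv track=rewrite | github.com/daryl-goh/DSA | CodeSignal/SingleFunction1b.py | solution
-- ===== SOURCE A (Python) =====
-- def solution(a, m, k):
--     count = 0
--     last_pos = {}  # Create an empty dictionary to store the last positions of elements in the array
--     max_complement_pos = -1  # Initialize the maximum position of the complement of an element as -1
--
--     for head, num in enumerate(a, 1):  # Iterate through the array with index and element value
--         tail = head - m  # Calculate the starting index of the sliding window
--
--         # Deletion part is to keep space complexity O(m).
--         # If this is not a concern (likely), safe to omit
--         if tail > 0 and last_pos[a[tail]] <= tail:  # Check if an element needs to be removed from the dictionary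
--             del last_pos[a[tail]]  # Remove the element from the dictionary if it's no longer in the sliding window
--
--         # Update max_complement_pos with the maximum position of an element whose complement is in the sliding window
--         max_complement_pos = max(max_complement_pos, last_pos.get(k-num, -1))
--
--         # Increment count if the current sliding window meets the condition for the sum equaling k
--         count += head >= m and max_complement_pos > tail
--
--         # Add the current element to last_pos with its value as key and its position as value
--         last_pos[num] = head
--
--     return count  # Return the final count of subarrays that meet the condition
-- ===== SOURCE B (Python) =====
-- def solution(a, m, k):
--     if m < 2:
--         return 0  # no window of size < 2 can contain a pair
--     count = 0
--     for s in range(len(a) - m + 1):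
--         seen = set()
--         found = False
--         for x in a[s:s+m]:
--             if k - x in seen:
--                 found = True
--                 break
--             seen.add(x)
--         if found:
--             count += 1
--     return count
-- ===== Notes on version B (the rewrite author's own statement) =====
-- stated objective: simpler
-- what changed: Replaces A's single incremental pass (last-position dict with eviction plus a cumulative max complement position) with an explicit per-window rescan using a seen-set, which is obviously correct.
-- outside the precondition, e.g. on solution([5], 1, 10): A returns 0, B returns 0; on solution([5, 5], 1, 10): A returns 0, B returns 0
-- crash fix: On m <= 0 with a nonempty array, and on m == 1 with a non-constant array, A raises IndexError/KeyError at the dict-eviction line while B returns the correct count 0 (no window of size <= 1 contains a pair). — e.g. on solution([1, 2], 0, 3): A raises KeyError, B returns 0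
import Mathlib
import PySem

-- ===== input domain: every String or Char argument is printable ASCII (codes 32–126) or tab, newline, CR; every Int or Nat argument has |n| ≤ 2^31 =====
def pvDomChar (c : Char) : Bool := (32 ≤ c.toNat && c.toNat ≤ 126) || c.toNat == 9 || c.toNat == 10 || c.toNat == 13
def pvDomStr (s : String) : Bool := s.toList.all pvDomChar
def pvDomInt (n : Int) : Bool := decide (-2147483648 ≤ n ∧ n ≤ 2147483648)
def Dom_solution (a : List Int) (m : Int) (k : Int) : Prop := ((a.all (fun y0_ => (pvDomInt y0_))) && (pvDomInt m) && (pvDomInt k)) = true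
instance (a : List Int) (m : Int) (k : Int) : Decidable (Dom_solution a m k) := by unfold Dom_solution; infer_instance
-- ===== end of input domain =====

-- B replaces A's incremental pass (last-position dict + cumulative max complement position) with a
-- plain per-window rescan using a seen-set; same return value on Pre_, not faster.

-- ===== PORT A =====
-- one loop step of A: state = (count, last_pos, max_complement_pos), p = (head, num)
def stepA (a : List Int) (m : Int) (k : Int)
    (st : Int × PySem.Dict Int Int × Int) (p : Int × Int) : Int × PySem.Dict Int Int × Int :=
  let count := st.1
  let lastPos := st.2.1
  let maxComplementPos := st.2.2
  let head := p.1
  let num := p.2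
  let tail := head - m
  let lastPos :=
    if tail > 0 then
      match PySem.List.pyGet? a tail with
      | some v =>
        match lastPos.get? v with
        | some pos => if pos ≤ tail then lastPos.erase v else lastPos
        | none => lastPos
      | none => lastPos
    else lastPos
  let maxComplementPos := max maxComplementPos (lastPos.getD (k - num) (-1))
  let count := count + (if head ≥ m ∧ maxComplementPos > tail then 1 else 0)
  (count, lastPos.insert num head, maxComplementPos)

def solution (a : List Int) (m : Int) (k : Int) : Int :=
  ((PySem.List.enumerate a 1).foldl (stepA a m k) (0, PySem.Dict.empty, -1)).1

-- ===== PORT B =====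
-- inner loop of B: scan the window left to right with a seen-set, breaking on the first pair
def pvScanStep (k : Int) (st : Bool × PySem.Set Int) (x : Int) : Bool × PySem.Set Int :=
  if st.1 then st
  else if PySem.Set.contains st.2 (k - x) then (true, st.2)
  else (st.1, PySem.Set.add st.2 x)

def windowHasPair (k : Int) (w : List Int) : Bool :=
  (w.foldl (pvScanStep k) (false, PySem.Set.empty)).1

def solution_alt (a : List Int) (m : Int) (k : Int) : Int :=
  if m < 2 then 0    -- no window of size < 2 can contain a pair
  else
  (PySem.List.pyRange 0 (PySem.List.len a - m + 1) 1).foldl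
    (fun count s =>
      if windowHasPair k (PySem.List.slice a (some s) (some (s + m))) then count + 1 else count)
    0

-- ===== PRECONDITION & SPEC =====
-- Pre_ excludes m ≤ 1 with a nonempty array: there A raises IndexError/KeyError at the dict-eviction
-- line on all but degenerate constant arrays (where it returns 0, as B does).
def Pre_solution (a : List Int) (m : Int) (k : Int) : Prop := 2 ≤ m ∨ a = []
instance (a : List Int) (m : Int) (k : Int) : Decidable (Pre_solution a m k) := by
  unfold Pre_solution; infer_instance
def pvWitness_solution : List Int × Int × Int := ([1, 5, 2, 4], 3, 6)

-- On m ≤ 0 with a nonempty array, and on m = 1 with a non-constant array, A raises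
-- IndexError/KeyError at the dict-eviction line while B returns the correct count 0.
def Raises_solution (a : List Int) (m : Int) (k : Int) : Prop :=
  (m ≤ 0 ∧ a ≠ []) ∨ (m = 1 ∧ ∃ x ∈ a, ∃ y ∈ a, x ≠ y)
instance (a : List Int) (m : Int) (k : Int) : Decidable (Raises_solution a m k) := by
  unfold Raises_solution; infer_instance
def pvRaiseWitness_solution : List Int × Int × Int := ([1, 2], 0, 3)
def pvRaiseWitnessOut_solution : Int := 0

def Spec_solution (a : List Int) (m : Int) (k : Int) (out : Int) : Prop := out = solution_alt a m k
instance (a : List Int) (m : Int) (k : Int) (out : Int) : Decidable (Spec_solution a m k out) := by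
  unfold Spec_solution; infer_instance

-- ===== CLAIM (what is proved, stated in full; the proofs are below) =====
def Claim_equal_solution : Prop := ∀ (a : List Int) (m : Int) (k : Int), Dom_solution a m k → Pre_solution a m k → Spec_solution a m k (solution a m k)
def Claim_raises_solution : Prop := (∀ (a : List Int) (m : Int) (k : Int), Dom_solution a m k → Raises_solution a m k → ¬ Pre_solution a m k) ∧ (Dom_solution (pvRaiseWitness_solution.1) (pvRaiseWitness_solution.2.1) (pvRaiseWitness_solution.2.2) ∧ Raises_solution (pvRaiseWitness_solution.1) (pvRaiseWitness_solution.2.1) (pvRaiseWitness_solution.2.2) ∧ solution_alt (pvRaiseWitness_solution.1) (pvRaiseWitness_solution.2.1) (pvRaiseWitness_solution.2.2) = pvRaiseWitnessOut_solution)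

-- ===== LEMMAS AND PROOFS =====
def lastPosFrom (v : Int) (s : Int) : List Int → Option Int
  | [] => none
  | x :: xs =>
    match lastPosFrom v (s + 1) xs with
    | some p => some p
    | none => if x = v then some s else none

def cpos (a : List Int) (k : Int) (j : Nat) : Int :=
  (lastPosFrom (k - a.getD j 0) 1 (a.take j)).getD (-1)

def Mx (a : List Int) (k : Int) : Nat → Int
  | 0 => -1
  | t + 1 => max (Mx a k t) (cpos a k t)

def Cc (a : List Int) (m k : Int) : Nat → Int
  | 0 => 0
  | t + 1 => Cc a m k t + (if ((t : Int) + 1 ≥ m ∧ Mx a k (t + 1) > (t : Int) + 1 - m) then 1 else 0)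

def DictFold (a : List Int) : Nat → PySem.Dict Int Int
  | 0 => PySem.Dict.empty
  | t + 1 => (DictFold a t).insert (a.getD t 0) ((t : Int) + 1)

def pairB (k : Int) : List Int → Bool
  | [] => false
  | x :: xs => decide ((k - x) ∈ xs) || pairB k xs

theorem lastPosFrom_append_singleton (v : Int) (x : Int) :
    ∀ (l : List Int) (s : Int),
      lastPosFrom v s (l ++ [x]) =
        if x = v then some (s + l.length) else lastPosFrom v s l := by
  intro l
  induction l with
  | nil => intro s; simp [lastPosFrom]
  | cons y ys ih =>
    intro s
    simp only [List.cons_append, lastPosFrom]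
    rw [ih]
    by_cases hx : x = v
    · simp [hx, List.length_cons]; ring_nf
    · simp [hx]

theorem lastPosFrom_some_le (v : Int) :
    ∀ (l : List Int) (s p : Int), lastPosFrom v s l = some p → s ≤ p := by
  intro l
  induction l with
  | nil => intro s p h; simp [lastPosFrom] at h
  | cons x xs ih =>
    intro s p h
    simp only [lastPosFrom] at h
    rcases hrec : lastPosFrom v (s + 1) xs with _ | q <;> rw [hrec] at h
    · split_ifs at h with hx <;> simp at h
      omega
    · simp at h
      have := ih (s + 1) q hrec
      omega

theorem lastPosFrom_ge (v : Int) :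
    ∀ (l : List Int) (s : Int) (i : Nat), i < l.length → l.getD i 0 = v →
      ∃ p, lastPosFrom v s l = some p ∧ s + i ≤ p := by
  intro l
  induction l with
  | nil => intro s i h; simp at h
  | cons x xs ih =>
    intro s i hlen hv
    cases i with
    | zero =>
      simp only [List.getD_cons_zero] at hv
      simp only [lastPosFrom]
      rcases hrec : lastPosFrom v (s + 1) xs with _ | q
      · exact ⟨s, by simp [hv], by omega⟩
      · exact ⟨q, rfl, by have := lastPosFrom_some_le v xs (s + 1) q hrec; omega⟩
    | succ i' =>
      simp only [List.length_cons] at hlen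
      simp only [List.getD_cons_succ] at hv
      obtain ⟨p, hp, hle⟩ := ih (s + 1) i' (by omega) hv
      refine ⟨p, ?_, by push_cast; push_cast at hle; omega⟩
      simp only [lastPosFrom, hp]

theorem lastPosFrom_getD_gt_iff (v : Int) :
    ∀ (l : List Int) (s0 q : Int), -1 ≤ q →
      ((lastPosFrom v s0 l).getD (-1) > q ↔
        ∃ i : Nat, i < l.length ∧ l.getD i 0 = v ∧ q < s0 + i) := by
  intro l
  induction l with
  | nil => intro s0 q hq; simp [lastPosFrom]; omega
  | cons x xs ih =>
    intro s0 q hq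
    constructor
    · intro h
      simp only [lastPosFrom] at h
      rcases hrec : lastPosFrom v (s0 + 1) xs with _ | p
      · rw [hrec] at h
        split_ifs at h with hx
        · simp at h
          exact ⟨0, by simp, by simpa using hx, by push_cast; omega⟩
        · simp at h; omega
      · rw [hrec] at h
        simp at h
        have := (ih (s0 + 1) q hq).mp (by rw [hrec]; simpa using h)
        obtain ⟨i, hi, hv2, hlt⟩ := this
        exact ⟨i + 1, by simp; omega, by simpa using hv2, by push_cast; push_cast at hlt; omega⟩
    · rintro ⟨i, hi, hv2, hlt⟩
      simp only [lastPosFrom]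
      cases i with
      | zero =>
        simp only [List.getD_cons_zero] at hv2
        rcases hrec : lastPosFrom v (s0 + 1) xs with _ | p
        · simp [hv2]; push_cast at hlt; omega
        · have := lastPosFrom_some_le v xs (s0 + 1) p hrec
          simp; push_cast at hlt; omega
      | succ i' =>
        simp only [List.length_cons] at hi
        simp only [List.getD_cons_succ] at hv2
        have : (lastPosFrom v (s0 + 1) xs).getD (-1) > q := by
          exact (ih (s0 + 1) q hq).mpr ⟨i', by omega, hv2, by push_cast; push_cast at hlt; omega⟩
        rcases hrec : lastPosFrom v (s0 + 1) xs with _ | p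
        · rw [hrec] at this; simp at this; omega
        · rw [hrec] at this; simpa using this

theorem getD_take_of_lt (a : List Int) (j i : Nat) (h : i < j) :
    (a.take j).getD i 0 = a.getD i 0 := by
  simp only [List.getD, List.getElem?_take]
  simp [h]

theorem get?_DictFold (a : List Int) (v : Int) :
    ∀ t : Nat, t ≤ a.length → (DictFold a t).get? v = lastPosFrom v 1 (a.take t) := by
  intro t
  induction t with
  | zero => intro _; simp [DictFold, lastPosFrom]
  | succ t ih =>
    intro ht
    have ht' : t < a.length := by omega
    have htake : a.take (t + 1) = a.take t ++ [a.getD t 0] := by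
      rw [List.take_succ]
      simp [List.getElem?_eq_getElem ht', List.getD, List.getElem?_eq_getElem ht']
    rw [DictFold, htake, lastPosFrom_append_singleton,
        PySem.Dict.get?_insert, ih (by omega)]
    have hlen : (a.take t).length = t := by simp; omega
    rw [hlen]
    simp only [List.getD]
    split_ifs with h1 h2 h2
    · congr 1; ring
    · exact absurd h1.symm h2
    · exact absurd h2.symm h1
    · rfl

theorem cpos_gt_iff (a : List Int) (k : Int) (j : Nat) (hj : j ≤ a.length) (s : Nat) :
    cpos a k j > (s : Int) ↔
      ∃ i : Nat, s ≤ i ∧ i < j ∧ a.getD i 0 + a.getD j 0 = k := by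
  unfold cpos
  rw [lastPosFrom_getD_gt_iff _ _ _ _ (by omega)]
  have hlen : (a.take j).length = j := by simp; omega
  constructor
  · rintro ⟨i, hi, hv, hlt⟩
    rw [hlen] at hi
    rw [getD_take_of_lt a j i hi] at hv
    exact ⟨i, by omega, hi, by omega⟩
  · rintro ⟨i, hsi, hij, hsum⟩
    refine ⟨i, by omega, ?_, by push_cast; omega⟩
    rw [getD_take_of_lt a j i hij]
    omega

theorem Mx_gt_iff (a : List Int) (k : Int) :
    ∀ (h : Nat), h ≤ a.length → ∀ (s : Nat),
      (Mx a k h > (s : Int) ↔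
        ∃ i j : Nat, s ≤ i ∧ i < j ∧ j < h ∧ a.getD i 0 + a.getD j 0 = k) := by
  intro h
  induction h with
  | zero =>
    intro _ s
    simp only [Mx]
    constructor
    · intro h; omega
    · rintro ⟨i, j, -, -, hj, -⟩; omega
  | succ h ih =>
    intro hh s
    rw [Mx]
    constructor
    · intro hgt
      rcases lt_or_ge (s : Int) (Mx a k h) with h1 | h1
      · obtain ⟨i, j, hij⟩ := (ih (by omega) s).mp h1
        exact ⟨i, j, hij.1, hij.2.1, by omega, hij.2.2.2⟩
      · have : cpos a k h > (s : Int) := by omega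
        obtain ⟨i, hsi, hih, hsum⟩ := (cpos_gt_iff a k h (by omega) s).mp this
        exact ⟨i, h, hsi, hih, by omega, hsum⟩
    · rintro ⟨i, j, hsi, hij, hjh, hsum⟩
      rcases Nat.lt_or_ge j h with hj | hj
      · have := (ih (by omega) s).mpr ⟨i, j, hsi, hij, hj, hsum⟩
        omega
      · have hjeq : j = h := by omega
        subst hjeq
        have := (cpos_gt_iff a k j (by omega) s).mpr ⟨i, hsi, hij, hsum⟩
        omega

theorem pairB_iff (k : Int) :
    ∀ w : List Int,
      (pairB k w = true ↔
        ∃ i j : Nat, i < j ∧ j < w.length ∧ w.getD i 0 + w.getD j 0 = k) := by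
  intro w
  induction w with
  | nil => simp [pairB]
  | cons x xs ih =>
    simp only [pairB, Bool.or_eq_true, decide_eq_true_eq, ih]
    constructor
    · rintro (hmem | ⟨i, j, hij, hj, hsum⟩)
      · obtain ⟨j, hj, hv⟩ := List.getElem_of_mem hmem
        refine ⟨0, j + 1, by omega, by simp; omega, ?_⟩
        simp only [List.getD_cons_zero, List.getD_cons_succ]
        rw [List.getD, List.getElem?_eq_getElem hj]
        simp only [Option.getD_some, hv]
        omega
      · exact ⟨i + 1, j + 1, by omega, by simp; omega,
          by simpa [List.getD_cons_succ] using hsum⟩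
    · rintro ⟨i, j, hij, hj, hsum⟩
      cases i with
      | zero =>
        left
        cases j with
        | zero => omega
        | succ j' =>
          simp only [List.getD_cons_zero, List.getD_cons_succ] at hsum
          simp only [List.length_cons] at hj
          have hj' : j' < xs.length := by omega
          rw [List.getD, List.getElem?_eq_getElem hj'] at hsum
          simp at hsum
          have : k - x = xs[j'] := by omega
          rw [this]
          exact List.getElem_mem hj'
      | succ i' =>
        right
        cases j with
        | zero => omega
        | succ j' =>
          simp only [List.getD_cons_succ] at hsum
          simp only [List.length_cons] at hj
          exact ⟨i', j', by omega, by omega, hsum⟩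

theorem pairB_append_singleton (k x : Int) :
    ∀ w : List Int, pairB k (w ++ [x]) = (pairB k w || decide ((k - x) ∈ w)) := by
  intro w
  induction w with
  | nil => simp [pairB]
  | cons y ys ih =>
    simp only [List.cons_append, pairB, ih, List.mem_append, List.mem_cons, List.mem_singleton]
    have hyx : (k - y = x) ↔ (k - x = y) := by omega
    by_cases h1 : (k - y) ∈ ys <;> by_cases h2 : k - x = y <;>
      by_cases h3 : (k - x) ∈ ys <;> by_cases h4 : pairB k ys <;>
      simp [h1, h2, h3, h4, hyx]

theorem scan_inv (k : Int) :
    ∀ w : List Int,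
      (w.foldl (pvScanStep k) (false, PySem.Set.empty)).1 = pairB k w ∧
      ((w.foldl (pvScanStep k) (false, PySem.Set.empty)).1 = false →
        (w.foldl (pvScanStep k) (false, PySem.Set.empty)).2 = PySem.Set.ofList w) := by
  intro w
  induction w using List.reverseRecOn with
  | nil => simp [pairB, PySem.Set.ofList]
  | append_singleton w x ih =>
    obtain ⟨ih1, ih2⟩ := ih
    rw [List.foldl_append]
    set st := w.foldl (pvScanStep k) (false, PySem.Set.empty) with hst
    rcases hfound : st.1 with _ | _
    · have hseen : st.2 = PySem.Set.ofList w := ih2 hfound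
      simp only [List.foldl_cons, List.foldl_nil, pvScanStep, hfound, Bool.false_eq_true,
        if_false, hseen]
      rw [pairB_append_singleton]
      rw [hfound] at ih1
      by_cases hmem : (k - x) ∈ w
      · have : PySem.Set.contains (PySem.Set.ofList w) (k - x) = true := by
          rw [PySem.Set.contains_iff]; rw [PySem.Set.mem_ofList]; exact hmem
        simp [this, ← ih1, hmem]
      · have : PySem.Set.contains (PySem.Set.ofList w) (k - x) = false := by
          rw [← Bool.not_eq_true, PySem.Set.contains_iff, PySem.Set.mem_ofList]; exact hmem
        simp [this, ← ih1, hmem, PySem.Set.ofList_append_singleton]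
    · simp only [List.foldl_cons, List.foldl_nil, pvScanStep, hfound, if_true]
      rw [pairB_append_singleton]
      rw [hfound] at ih1
      simp [← ih1]

theorem windowHasPair_eq_pairB (k : Int) (w : List Int) :
    windowHasPair k w = pairB k w := (scan_inv k w).1

theorem A_state (a : List Int) (m k : Int) (hm : 2 ≤ m) :
    ∀ t : Nat, t ≤ a.length →
      (PySem.List.enumerate (a.take t) 1).foldl (stepA a m k) (0, PySem.Dict.empty, -1)
        = (Cc a m k t, DictFold a t, Mx a k t) := by
  intro t
  induction t with
  | zero => intro _; rfl
  | succ t ih =>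
    intro ht
    have ht' : t < a.length := by omega
    have htake : a.take (t + 1) = a.take t ++ [a.getD t 0] := by
      rw [List.take_succ]
      simp [List.getElem?_eq_getElem ht', List.getD, List.getElem?_eq_getElem ht']
    rw [htake, PySem.List.enumerate_append, List.foldl_append, ih (by omega)]
    have hlen : ((a.take t).length : Int) = (t : Int) := by simp; omega
    rw [hlen]
    have hco : (1 : Int) + (t : Int) = (t : Int) + 1 := by ring
    rw [hco]
    simp only [PySem.List.enumerate_cons, PySem.List.enumerate_nil, List.foldl_cons,
      List.foldl_nil]
    simp only [stepA]
    -- the eviction branch is a no-op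
    have hdict :
        (if (t : Int) + 1 - m > 0 then
          match PySem.List.pyGet? a ((t : Int) + 1 - m) with
          | some v =>
            match (DictFold a t).get? v with
            | some pos => if pos ≤ (t : Int) + 1 - m then (DictFold a t).erase v else DictFold a t
            | none => DictFold a t
          | none => DictFold a t
         else DictFold a t) = DictFold a t := by
      by_cases htail : (t : Int) + 1 - m > 0
      · rw [if_pos htail]
        have hu : ((t : Int) + 1 - m) = ((t + 1 - m.toNat : Nat) : Int) := by omega
        have hu2 : t + 1 - m.toNat < a.length := by omega
        have hu3 : t + 1 - m.toNat < t := by omega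
        rw [hu, PySem.List.pyGet?_natCast, List.getElem?_eq_getElem hu2]
        have hval : a[t + 1 - m.toNat] = a.getD (t + 1 - m.toNat) 0 := by
          rw [List.getD_eq_getElem _ _ hu2]
        rw [hval]
        show (match (DictFold a t).get? (a.getD (t + 1 - m.toNat) 0) with
          | some pos => if pos ≤ ((t + 1 - m.toNat : Nat) : Int) then
              (DictFold a t).erase (a.getD (t + 1 - m.toNat) 0) else DictFold a t
          | none => DictFold a t) = DictFold a t
        obtain ⟨p, hp, hple⟩ := lastPosFrom_ge (a.getD (t + 1 - m.toNat) 0) (a.take t) 1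
          (t + 1 - m.toNat) (by simp; omega)
          (getD_take_of_lt a t (t + 1 - m.toNat) hu3)
        have hq : (DictFold a t).get? (a.getD (t + 1 - m.toNat) 0) = some p := by
          rw [get?_DictFold a _ t (by omega)]; exact hp
        rw [hq]
        show (if p ≤ ((t + 1 - m.toNat : Nat) : Int) then
            (DictFold a t).erase (a.getD (t + 1 - m.toNat) 0) else DictFold a t) = DictFold a t
        rw [if_neg (by omega)]
      · rw [if_neg htail]
    rw [hdict]
    have hmc : (DictFold a t).getD (k - a.getD t 0) (-1) = cpos a k t := by
      rw [PySem.Dict.getD_eq_get?_getD, get?_DictFold a _ t (by omega)]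
      rfl
    rw [hmc]
    show ((Cc a m k t + if (t : Int) + 1 ≥ m ∧ max (Mx a k t) (cpos a k t) > (t : Int) + 1 - m then 1 else 0,
        (DictFold a t).insert (a.getD t 0) ((t : Int) + 1),
        max (Mx a k t) (cpos a k t)) : Int × PySem.Dict Int Int × Int)
      = (Cc a m k (t + 1), DictFold a (t + 1), Mx a k (t + 1))
    rw [Cc, DictFold, Mx]

theorem Cc_eq_countP (a : List Int) (m k : Int) (hm : 2 ≤ m) :
    ∀ t : Nat, t ≤ a.length →
      Cc a m k t =
        (((List.range (((t : Int) - m + 1).toNat)).countP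
            (fun s => decide (Mx a k (s + m.toNat) > (s : Int)))) : Int) := by
  intro t
  induction t with
  | zero =>
    intro _
    rw [show (((0 : Nat) : Int) - m + 1) = 1 - m by push_cast; ring,
      Int.toNat_of_nonpos (show (1 : Int) - m ≤ 0 by omega)]
    simp [Cc]
  | succ t ih =>
    intro ht
    rw [Cc, ih (by omega)]
    rcases lt_or_ge ((t : Int) + 1) m with hlt | hge
    · rw [if_neg (by omega)]
      have h1 : ((((t + 1 : Nat)) : Int) - m + 1).toNat = (((t : Nat) : Int) - m + 1).toNat := by
        push_cast; omega
      rw [h1]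
      ring
    · have hNv : ((((t + 1 : Nat)) : Int) - m + 1).toNat = (((t : Nat) : Int) - m + 1).toNat + 1 := by
        push_cast; omega
      rw [hNv, List.range_succ, List.countP_append, List.countP_cons, List.countP_nil]
      set N := (((t : Nat) : Int) - m + 1).toNat with hN
      have hNm : N + m.toNat = t + 1 := by omega
      have hNi : ((N : Nat) : Int) = (t : Int) + 1 - m := by omega
      by_cases hMx : Mx a k (t + 1) > (t : Int) + 1 - m
      · rw [if_pos ⟨by omega, hMx⟩]
        simp only [hNm, hNi, hMx, decide_true, if_true]
        push_cast
        ring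
      · rw [if_neg (fun h => hMx h.2)]
        simp only [hNm, hNi, hMx, decide_false, if_false]
        push_cast
        ring

theorem solution_alt_eq_countP (a : List Int) (m k : Int) (hm : 2 ≤ m) :
    solution_alt a m k =
      (((List.range (((a.length : Int) - m + 1).toNat)).countP
          (fun s => windowHasPair k ((a.drop s).take m.toNat))) : Int) := by
  unfold solution_alt
  rw [if_neg (by omega)]
  rw [show PySem.List.len a = (a.length : Int) from by simp [PySem.List.len_eq],
    PySem.List.pyRange_one]
  rw [List.foldl_map]
  have hsub : ((a.length : Int) - m + 1 - 0) = ((a.length : Int) - m + 1) := by ring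
  rw [hsub]
  have hcongr : ∀ (acc : Int) (s : Nat), s ∈ List.range (((a.length : Int) - m + 1).toNat) →
      (if windowHasPair k (PySem.List.slice a (some ((0 : Int) + (s : Int)))
          (some ((0 : Int) + (s : Int) + m))) then acc + 1 else acc)
        = (if windowHasPair k ((a.drop s).take m.toNat) then acc + 1 else acc) := by
    intro acc s _
    show (if windowHasPair k (PySem.List.slice a (some ((0 : Int) + (s : Int)))
        (some ((0 : Int) + (s : Int) + m))) then acc + 1 else acc)
      = (if windowHasPair k ((a.drop s).take m.toNat) then acc + 1 else acc)
    have h1 : ((0 : Int) + (s : Int)) = ((s : Nat) : Int) := by ring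
    have h2 : ((s : Int) + m) = (((s + m.toNat : Nat)) : Int) := by push_cast; omega
    rw [h1, h2, PySem.List.slice_natCast]
    have h3 : s + m.toNat - s = m.toNat := by omega
    rw [h3]
  refine Eq.trans (PySem.List.foldl_congr_mem _ _ _ _ hcongr) ?_
  rw [PySem.List.foldl_if_add_one]
  ring

theorem window_bridge (a : List Int) (m k : Int) (hm : 2 ≤ m) (s : Nat)
    (hs : s + m.toNat ≤ a.length) :
    (pairB k ((a.drop s).take m.toNat) = true) ↔ Mx a k (s + m.toNat) > (s : Int) := by
  have hwlen : ((a.drop s).take m.toNat).length = m.toNat := by simp; omega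
  have hwget : ∀ i : Nat, i < m.toNat → ((a.drop s).take m.toNat).getD i 0 = a.getD (s + i) 0 := by
    intro i hi
    simp only [List.getD, List.getElem?_take, hi, if_pos, List.getElem?_drop]
  rw [pairB_iff, Mx_gt_iff a k (s + m.toNat) hs s]
  constructor
  · rintro ⟨i, j, hij, hj, hsum⟩
    rw [hwlen] at hj
    rw [hwget i (by omega), hwget j hj] at hsum
    exact ⟨s + i, s + j, by omega, by omega, by omega, hsum⟩
  · rintro ⟨i, j, hsi, hij, hjh, hsum⟩
    refine ⟨i - s, j - s, by omega, by rw [hwlen]; omega, ?_⟩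
    rw [hwget (i - s) (by omega), hwget (j - s) (by omega)]
    have h1 : s + (i - s) = i := by omega
    have h2 : s + (j - s) = j := by omega
    rw [h1, h2]
    exact hsum

theorem main_equal (a : List Int) (m k : Int) (hpre : 2 ≤ m ∨ a = []) :
    solution a m k = solution_alt a m k := by
  by_cases hm : 2 ≤ m
  · have hA := A_state a m k hm a.length le_rfl
    rw [List.take_length] at hA
    unfold solution
    rw [hA]
    show Cc a m k a.length = solution_alt a m k
    rw [Cc_eq_countP a m k hm a.length le_rfl, solution_alt_eq_countP a m k hm]
    congr 1
    apply List.countP_congr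
    intro s hsmem
    have hsN : s < ((a.length : Int) - m + 1).toNat := List.mem_range.mp hsmem
    have hle : s + m.toNat ≤ a.length := by omega
    have hw := window_bridge a m k hm s hle
    rw [windowHasPair_eq_pairB]
    simp only [← hw, Bool.decide_eq_true]
  · have hnil : a = [] := by tauto
    subst hnil
    unfold solution solution_alt
    rw [if_pos (by omega)]
    rfl

-- ===== VERDICT (by name: the statement is the Claim_ definition above) =====
theorem solution_spec : Claim_equal_solution := by
  intro a m k _ hpre
  unfold Spec_solution
  exact main_equal a m k hpre

@[simp] theorem solution_raises : Claim_raises_solution := by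
  unfold Claim_raises_solution
  constructor
  · rintro a m k _ (⟨h1, h2⟩ | ⟨h1, x, hx, y, hy, hxy⟩) (hp | hp)
    · omega
    · exact h2 hp
    · omega
    · subst hp; simp at hx
  · exact ⟨by decide, by decide, by decide⟩
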